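-- pv_equiv track=rewrite | github.com/bon24/codingpractice | 프로그래머스/0/120956. 옹알이 （1）/옹알이 （1）.py | solution
-- ===== SOURCE A (Python) =====
-- def solution(babbling):
--     answer = 0
--     check=[]
--     say = ["aya", "ye", "woo", "ma"]
--     for baby in babbling:
--         for can in say:
--             if can in baby:
--                 for i in say:
--                     baby = baby.replace(i," ")
--                 check.append(baby)
--     for i in range(len(check)):
--         check[i]=check[i].replace(" ","")
--     for i in check:
--         if i=="":
--             answer+=1
--     return answer
-- ===== SOURCE B (Python) =====
-- def solution(babbling):
--     count = 0
--     for w in babbling: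
--         i = 0
--         ok = True
--         while ok and i < len(w):
--             if w.startswith("aya", i):
--                 i += 3
--             elif w.startswith("ye", i):
--                 i += 2
--             elif w.startswith("woo", i):
--                 i += 3
--             elif w.startswith("ma", i):
--                 i += 2
--             else:
--                 ok = False
--         if ok and w:
--             count += 1
--     return count
-- ===== Notes on version B (the rewrite author's own statement) =====
-- stated objective: alternative
-- what changed: B replaces A's build-a-list-then-three-more-passes pipeline (four sequential str.replace passes per word plus a space-stripping pass and a counting pass) by a single left-to-right greedy index scan per word that consumes one syllable at a time, counting words in one loop.
-- intended difference: On lists containing a word that is a concatenation of the syllables aya/ye/woo/ma and at least one space (e.g. 'ma ma'), A counts the word (its replace-with-space pipeline erases the spaces at the end), while B does not count it; only whole words that are space-free concatenations of the allowed syllables are intended to count as babbling. — e.g. on solution(["ma ma"]): A returns 1, B returns 0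
import Mathlib
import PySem

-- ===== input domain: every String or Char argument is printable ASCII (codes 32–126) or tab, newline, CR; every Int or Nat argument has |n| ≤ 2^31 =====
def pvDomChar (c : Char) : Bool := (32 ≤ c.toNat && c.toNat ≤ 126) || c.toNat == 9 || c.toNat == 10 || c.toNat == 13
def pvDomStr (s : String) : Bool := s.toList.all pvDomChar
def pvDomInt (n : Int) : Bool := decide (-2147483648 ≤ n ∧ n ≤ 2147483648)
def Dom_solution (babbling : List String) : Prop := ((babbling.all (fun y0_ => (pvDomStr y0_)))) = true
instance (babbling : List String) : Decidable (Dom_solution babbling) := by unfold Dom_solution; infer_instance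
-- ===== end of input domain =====

-- B replaces A's four-sequential-replace + strip + count passes by one greedy index scan per word
-- ('alternative'); on space-containing syllable concatenations (D_) A counts the word and B does not.


-- ===== PORT A =====
def solution (babbling : List String) : Int :=
  let say : List String := ["aya", "ye", "woo", "ma"]
  let check : List String := babbling.foldl (fun check baby =>
    ((say.foldl (fun (st : String × List String) can =>
        if PySem.Str.isIn can st.1 then
          let b' := say.foldl (fun b i => PySem.Str.replace b i " ") st.1
          (b', st.2 ++ [b'])
        else st) (baby, check)).2)) []
  let check2 : List String := check.map (fun s => PySem.Str.replace s " " "")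
  check2.foldl (fun answer i => if i == "" then answer + 1 else answer) (0 : Int)

-- ===== PORT B =====
-- greedy scan by index i, one syllable consumed per step (the fuel only makes the while-loop structural)
def bLoop (w : List Char) : Nat → Nat → Bool
  | 0, _ => false
  | fuel+1, i =>
    if i < w.length then
      if ['a','y','a'].isPrefixOf (w.drop i) then bLoop w fuel (i+3)
      else if ['y','e'].isPrefixOf (w.drop i) then bLoop w fuel (i+2)
      else if ['w','o','o'].isPrefixOf (w.drop i) then bLoop w fuel (i+3)
      else if ['m','a'].isPrefixOf (w.drop i) then bLoop w fuel (i+2)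
      else false
    else true

def solution_alt (babbling : List String) : Int :=
  babbling.foldl (fun count w =>
    if bLoop w.toList (w.toList.length + 1) 0 && !w.toList.isEmpty then count + 1 else count) 0

-- ===== PRECONDITION & SPEC =====
-- membership in the language (aya|ye|woo|ma|' ')*, a condition on the input used only to state D_
def spc : Nat → List Char → Bool
  | _, [] => true
  | 0, _ => false
  | n+1, w => [" ", "ye", "ma", "aya", "woo"].any fun t => t.toList.isPrefixOf w && spc n (w.drop t.length)

-- On lists containing a word that is a concatenation of the syllables aya/ye/woo/ma and at least one
-- space (e.g. "ma ma"), A counts the word (its replace-with-space pipeline erases the spaces at the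
-- end), while B does not count it; only space-free syllable concatenations are intended to count.
def D_solution (babbling : List String) : Prop :=
  ∃ w ∈ babbling, ' ' ∈ w.toList ∧ w.toList.any (· != ' ') ∧ spc w.length w.toList
instance (babbling : List String) : Decidable (D_solution babbling) := by
  unfold D_solution; infer_instance

def Spec_solution (babbling : List String) (out : Int) : Prop :=
  ¬ D_solution babbling → out = solution_alt babbling
instance (babbling : List String) (out : Int) : Decidable (Spec_solution babbling out) := by
  unfold Spec_solution; infer_instance

def pvDiffWitness_solution : List String := ["ma ma"]
def pvDiffWitnessOut_solution : Int × Int := (1, 0)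

-- ===== CLAIM (what is proved, stated in full; the proofs are below) =====
def Claim_unchanged_solution : Prop :=
  ∀ (babbling : List String), Dom_solution babbling → Spec_solution babbling (solution babbling)
def Claim_changed_solution : Prop :=
  Dom_solution (pvDiffWitness_solution) ∧ D_solution (pvDiffWitness_solution) ∧
  solution (pvDiffWitness_solution) = pvDiffWitnessOut_solution.1 ∧
  solution_alt (pvDiffWitness_solution) = pvDiffWitnessOut_solution.2 ∧
  pvDiffWitnessOut_solution.1 ≠ pvDiffWitnessOut_solution.2
def Claim_exact_solution : Prop :=
  ∀ (babbling : List String), Dom_solution babbling → D_solution babbling →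
    solution babbling ≠ solution_alt babbling

-- ===== LEMMAS AND PROOFS =====

-- proof-side predicates: the token language without spaces (B's acceptance) and with spaces (A's)
def altScan : List Char → Bool
  | [] => true
  | 'a'::'y'::'a'::r => altScan r
  | 'y'::'e'::r => altScan r
  | 'w'::'o'::'o'::r => altScan r
  | 'm'::'a'::r => altScan r
  | _ => false

def spacedTokP : List Char → Bool
  | [] => true
  | 'a'::'y'::'a'::r => spacedTokP r
  | 'y'::'e'::r => spacedTokP r
  | 'w'::'o'::'o'::r => spacedTokP r
  | 'm'::'a'::r => spacedTokP r
  | ' '::r => spacedTokP r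
  | _ => false

theorem spc_succ (n : Nat) (c : Char) (t : List Char) :
    spc (n+1) (c::t) =
      ([' '].isPrefixOf (c::t) && spc n ((c::t).drop 1)
       || ['y','e'].isPrefixOf (c::t) && spc n ((c::t).drop 2)
       || ['m','a'].isPrefixOf (c::t) && spc n ((c::t).drop 2)
       || ['a','y','a'].isPrefixOf (c::t) && spc n ((c::t).drop 3)
       || ['w','o','o'].isPrefixOf (c::t) && spc n ((c::t).drop 3)) := by
  have e1 : (" " : String).toList = [' '] := by decide
  have e2 : ("ye" : String).toList = ['y','e'] := by decide
  have e3 : ("ma" : String).toList = ['m','a'] := by decide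
  have e4 : ("aya" : String).toList = ['a','y','a'] := by decide
  have e5 : ("woo" : String).toList = ['w','o','o'] := by decide
  have l1 : (" " : String).length = 1 := by decide
  have l2 : ("ye" : String).length = 2 := by decide
  have l3 : ("ma" : String).length = 2 := by decide
  have l4 : ("aya" : String).length = 3 := by decide
  have l5 : ("woo" : String).length = 3 := by decide
  simp only [spc, List.any_cons, List.any_nil, e1, e2, e3, e4, e5, l1, l2, l3, l4, l5,
    Bool.or_false, Bool.or_assoc]

theorem spc_eq : ∀ (n : Nat) (w : List Char), w.length ≤ n → spc n w = spacedTokP w := by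
  intro n
  induction n with
  | zero =>
    intro w hw
    have : w = [] := List.eq_nil_of_length_eq_zero (by omega)
    subst this; rfl
  | succ n ih =>
    intro w hw
    rw [spacedTokP.eq_def]
    split
    · rfl
    · rename_i r
      rw [spc_succ]
      simp only [List.isPrefixOf, List.drop_succ_cons, List.drop_zero]
      simp
      exact ih r (by simp at hw; omega)
    · rename_i r
      rw [spc_succ]
      simp only [List.isPrefixOf, List.drop_succ_cons, List.drop_zero]
      simp
      exact ih r (by simp at hw; omega)
    · rename_i r
      rw [spc_succ]
      simp only [List.isPrefixOf, List.drop_succ_cons, List.drop_zero]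
      simp
      exact ih r (by simp at hw; omega)
    · rename_i r
      rw [spc_succ]
      simp only [List.isPrefixOf, List.drop_succ_cons, List.drop_zero]
      simp
      exact ih r (by simp at hw; omega)
    · rename_i r
      rw [spc_succ]
      simp only [List.isPrefixOf, List.drop_succ_cons, List.drop_zero]
      simp
      exact ih r (by simp at hw; omega)
    · rename_i w' h_nil h_aya h_ye h_woo h_ma h_sp
      cases w with
      | nil => exact absurd (h_nil rfl) id
      | cons c t =>
        have hc : c ≠ ' ' := fun h => h_sp t (by rw [h])
        have p1 : [' '].isPrefixOf (c::t) = false := by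
          simp [List.isPrefixOf, Ne.symm hc]
        have p2 : ['y','e'].isPrefixOf (c::t) = false := by
          rw [← Bool.not_eq_true, List.isPrefixOf_iff_prefix]
          intro hh; obtain ⟨u, hu⟩ := hh
          have hx : c = 'y' ∧ t = 'e'::u := by simpa using hu.symm
          exact h_ye u (by simp [hx.1, hx.2])
        have p3 : ['m','a'].isPrefixOf (c::t) = false := by
          rw [← Bool.not_eq_true, List.isPrefixOf_iff_prefix]
          intro hh; obtain ⟨u, hu⟩ := hh
          have hx : c = 'm' ∧ t = 'a'::u := by simpa using hu.symm
          exact h_ma u (by simp [hx.1, hx.2])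
        have p4 : ['a','y','a'].isPrefixOf (c::t) = false := by
          rw [← Bool.not_eq_true, List.isPrefixOf_iff_prefix]
          intro hh; obtain ⟨u, hu⟩ := hh
          have hx : c = 'a' ∧ t = 'y'::'a'::u := by simpa using hu.symm
          exact h_aya u (by simp [hx.1, hx.2])
        have p5 : ['w','o','o'].isPrefixOf (c::t) = false := by
          rw [← Bool.not_eq_true, List.isPrefixOf_iff_prefix]
          intro hh; obtain ⟨u, hu⟩ := hh
          have hx : c = 'w' ∧ t = 'o'::'o'::u := by simpa using hu.symm
          exact h_woo u (by simp [hx.1, hx.2])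
        rw [spc_succ, p1, p2, p3, p4, p5]
        simp

theorem pref2 {a b : Char} {l : List Char} (h : [a,b].isPrefixOf l = true) :
    l = a :: b :: l.drop 2 := by
  obtain ⟨u, hu⟩ := List.isPrefixOf_iff_prefix.mp h
  rw [← hu]; simp

theorem pref3 {a b c : Char} {l : List Char} (h : [a,b,c].isPrefixOf l = true) :
    l = a :: b :: c :: l.drop 3 := by
  obtain ⟨u, hu⟩ := List.isPrefixOf_iff_prefix.mp h
  rw [← hu]; simp

theorem altScan_false (l : List Char) (h0 : l ≠ [])
    (h1 : ['a','y','a'].isPrefixOf l = false) (h2 : ['y','e'].isPrefixOf l = false)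
    (h3 : ['w','o','o'].isPrefixOf l = false) (h4 : ['m','a'].isPrefixOf l = false) :
    altScan l = false := by
  rw [altScan.eq_def]
  split
  · exact absurd rfl h0
  · simp [List.isPrefixOf] at h1
  · simp [List.isPrefixOf] at h2
  · simp [List.isPrefixOf] at h3
  · simp [List.isPrefixOf] at h4
  · rfl

theorem altScan_chain (l : List Char) (hl : l ≠ []) :
    altScan l = (if ['a','y','a'].isPrefixOf l then altScan (l.drop 3)
      else if ['y','e'].isPrefixOf l then altScan (l.drop 2)
      else if ['w','o','o'].isPrefixOf l then altScan (l.drop 3)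
      else if ['m','a'].isPrefixOf l then altScan (l.drop 2)
      else false) := by
  by_cases h1 : ['a','y','a'].isPrefixOf l
  · rw [if_pos h1]
    conv_lhs => rw [pref3 h1]
    rfl
  · rw [if_neg h1]
    by_cases h2 : ['y','e'].isPrefixOf l
    · rw [if_pos h2]
      conv_lhs => rw [pref2 h2]
      rfl
    · rw [if_neg h2]
      by_cases h3 : ['w','o','o'].isPrefixOf l
      · rw [if_pos h3]
        conv_lhs => rw [pref3 h3]
        rfl
      · rw [if_neg h3]
        by_cases h4 : ['m','a'].isPrefixOf l
        · rw [if_pos h4]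
          conv_lhs => rw [pref2 h4]
          rfl
        · rw [if_neg h4]
          exact altScan_false l hl (Bool.eq_false_iff.mpr h1) (Bool.eq_false_iff.mpr h2)
            (Bool.eq_false_iff.mpr h3) (Bool.eq_false_iff.mpr h4)

theorem bLoop_eq (w : List Char) : ∀ (fuel i : Nat), w.length - i < fuel →
    bLoop w fuel i = altScan (w.drop i) := by
  intro fuel
  induction fuel with
  | zero => intro i h; omega
  | succ fuel ih =>
    intro i h
    by_cases hi : i < w.length
    · have hne : w.drop i ≠ [] := by
        simp only [ne_eq, List.drop_eq_nil_iff]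
        omega
      rw [bLoop, if_pos hi, altScan_chain (w.drop i) hne]
      simp only [List.drop_drop]
      split_ifs with h1 h2 h3 h4
      · rw [ih (i+3) (by omega)]
      · rw [ih (i+2) (by omega)]
      · rw [ih (i+3) (by omega)]
      · rw [ih (i+2) (by omega)]
      · rfl
    · rw [bLoop, if_neg hi]
      rw [List.drop_eq_nil_of_le (by omega)]
      rfl

theorem alt_ind (w : String) :
    (bLoop w.toList (w.toList.length + 1) 0 && !w.toList.isEmpty)
      = (altScan w.toList && !w.toList.isEmpty) := by
  rw [bLoop_eq w.toList (w.toList.length + 1) 0 (by omega), List.drop_zero]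

-- ==== A-side characterisation (A counts w iff w ∈ (tok|' ')* and w contains a token) ====

def repF (old new : List Char) : Nat → List Char → List Char
  | 0, l => l
  | _ + 1, [] => []
  | fuel + 1, c :: t =>
      if old.isPrefixOf (c :: t) then new ++ repF old new fuel ((c :: t).drop old.length)
      else c :: repF old new fuel t

theorem go_eq_repF (old new : List Char) (fuel : Nat) (l acc : List Char) :
    PySem.Chars.replace.go old new fuel l acc = acc.reverse ++ repF old new fuel l := by
  induction fuel generalizing l acc with
  | zero => simp [PySem.Chars.replace.go, repF]
  | succ n ih =>
    cases l with
    | nil => simp [PySem.Chars.replace.go, repF]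
    | cons c t =>
      rw [PySem.Chars.replace.go]
      by_cases hp : old.isPrefixOf (c :: t)
      · rw [if_pos hp, ih, repF, if_pos hp]; simp
      · rw [if_neg hp, ih, repF, if_neg hp]; simp

theorem replace_eq_repF (old new l : List Char) (h : old ≠ []) :
    PySem.Chars.replace l old new = repF old new l.length l := by
  rw [PySem.Chars.replace, if_neg (by simp [List.isEmpty_iff, h]), go_eq_repF]; simp

theorem repF_irrel (old new : List Char) (h : old ≠ []) :
    ∀ (fuel fuel' : Nat) (l : List Char), l.length ≤ fuel → l.length ≤ fuel' →
      repF old new fuel l = repF old new fuel' l := by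
  intro fuel
  induction fuel with
  | zero =>
    intro fuel' l hl _
    have : l = [] := List.eq_nil_of_length_eq_zero (by omega)
    subst this; cases fuel' <;> rfl
  | succ n ih =>
    intro fuel' l hl hl'
    cases l with
    | nil => cases fuel' <;> rfl
    | cons c t =>
      cases fuel' with
      | zero => simp at hl'
      | succ m =>
        simp only [List.length_cons] at hl hl'
        rw [repF, repF]
        by_cases hp : old.isPrefixOf (c :: t)
        · rw [if_pos hp, if_pos hp]
          have hol : 1 ≤ old.length := by
            cases old with | nil => exact absurd rfl h | cons a b => simp
          have := ih m ((c :: t).drop old.length) (by simp; omega) (by simp; omega)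
          rw [this]
        · rw [if_neg hp, if_neg hp, ih m t (by simp at hl; omega) (by simp at hl'; omega)]

def pvAYA : List Char := ['a', 'y', 'a']
def pvYE : List Char := ['y', 'e']
def pvWOO : List Char := ['w', 'o', 'o']
def pvMA : List Char := ['m', 'a']
def pvSP : List Char := [' ']

theorem replace_nil (old new : List Char) (h : old ≠ []) :
    PySem.Chars.replace [] old new = [] := by
  rw [replace_eq_repF _ _ _ h]; rfl

theorem replace_cons_neg (old new : List Char) (h : old ≠ []) (c : Char) (t : List Char)
    (hp : old.isPrefixOf (c :: t) = false) :
    PySem.Chars.replace (c :: t) old new = c :: PySem.Chars.replace t old new := by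
  rw [replace_eq_repF _ _ _ h, replace_eq_repF _ _ _ h, List.length_cons, repF, if_neg (by simp [hp])]

theorem replace_pos (old new l : List Char) (h : old ≠ []) (hp : old.isPrefixOf l = true) :
    PySem.Chars.replace l old new = new ++ PySem.Chars.replace (l.drop old.length) old new := by
  cases l with
  | nil =>
    have := List.isPrefixOf_iff_prefix.mp hp
    simp at this; subst this; exact absurd rfl h
  | cons c t =>
    have hol : 1 ≤ old.length := by
      cases old with | nil => exact absurd rfl h | cons a b => simp
    rw [replace_eq_repF _ _ _ h, replace_eq_repF _ _ _ h, List.length_cons, repF, if_pos hp]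
    congr 1
    exact repF_irrel old new h t.length ((c :: t).drop old.length).length ((c :: t).drop old.length)
      (by simp; omega) le_rfl

theorem head_replace (old l : List Char) (h : old ≠ []) (c : Char)
    (hc : (PySem.Chars.replace l old pvSP).head? = some c) : c = ' ' ∨ l.head? = some c := by
  cases l with
  | nil => rw [replace_nil _ _ h] at hc; simp at hc
  | cons d t =>
    by_cases hp : old.isPrefixOf (d :: t)
    · rw [replace_pos _ _ _ h hp] at hc
      simp [pvSP] at hc
      exact Or.inl hc.symm
    · rw [replace_cons_neg _ _ h _ _ (by simp [List.isPrefixOf_iff_prefix, hp])] at hc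
      simp at hc
      exact Or.inr (by simp [hc])

def r1 (w : List Char) : List Char := PySem.Chars.replace w pvAYA pvSP
def r2 (w : List Char) : List Char := PySem.Chars.replace w pvYE pvSP
def r3 (w : List Char) : List Char := PySem.Chars.replace w pvWOO pvSP
def r4 (w : List Char) : List Char := PySem.Chars.replace w pvMA pvSP
def chain (w : List Char) : List Char := r4 (r3 (r2 (r1 w)))

theorem r1_cons (c : Char) (t : List Char) (h : pvAYA.isPrefixOf (c :: t) = false) :
    r1 (c :: t) = c :: r1 t := replace_cons_neg _ _ (by decide) _ _ h
theorem r2_cons (c : Char) (t : List Char) (h : pvYE.isPrefixOf (c :: t) = false) :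
    r2 (c :: t) = c :: r2 t := replace_cons_neg _ _ (by decide) _ _ h
theorem r3_cons (c : Char) (t : List Char) (h : pvWOO.isPrefixOf (c :: t) = false) :
    r3 (c :: t) = c :: r3 t := replace_cons_neg _ _ (by decide) _ _ h
theorem r4_cons (c : Char) (t : List Char) (h : pvMA.isPrefixOf (c :: t) = false) :
    r4 (c :: t) = c :: r4 t := replace_cons_neg _ _ (by decide) _ _ h

theorem head_r1 (t : List Char) (c : Char) (h : (r1 t).head? = some c) :
    c = ' ' ∨ t.head? = some c := head_replace _ _ (by decide) _ h
theorem head_c2 (t : List Char) (c : Char) (h : (r2 (r1 t)).head? = some c) :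
    c = ' ' ∨ t.head? = some c := by
  rcases head_replace _ _ (by decide) _ h with h' | h'
  · exact Or.inl h'
  · exact head_r1 _ _ h'
theorem head_c3 (t : List Char) (c : Char) (h : (r3 (r2 (r1 t))).head? = some c) :
    c = ' ' ∨ t.head? = some c := by
  rcases head_replace _ _ (by decide) _ h with h' | h'
  · exact Or.inl h'
  · exact head_c2 _ _ h'

theorem dist234_sp (X : List Char) : r4 (r3 (r2 (' ' :: X))) = ' ' :: r4 (r3 (r2 X)) := by
  rw [r2_cons _ _ (by simp [pvYE, List.isPrefixOf]),
      r3_cons _ _ (by simp [pvWOO, List.isPrefixOf]),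
      r4_cons _ _ (by simp [pvMA, List.isPrefixOf])]

theorem ceq_nil : chain [] = [] := by
  unfold chain r1 r2 r3 r4
  rw [replace_nil _ _ (by decide), replace_nil _ _ (by decide),
      replace_nil _ _ (by decide), replace_nil _ _ (by decide)]

theorem ceq_aya (t : List Char) : chain ('a'::'y'::'a'::t) = ' ' :: chain t := by
  unfold chain
  have h1 : r1 ('a'::'y'::'a'::t) = ' ' :: r1 t := by
    unfold r1
    rw [replace_pos _ _ _ (by decide) (by simp [pvAYA, List.isPrefixOf])]
    simp [pvAYA, pvSP]
  rw [h1, dist234_sp]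

theorem ceq_ye (t : List Char) : chain ('y'::'e'::t) = ' ' :: chain t := by
  unfold chain
  rw [r1_cons _ _ (by simp [pvAYA, List.isPrefixOf]),
      r1_cons _ _ (by simp [pvAYA, List.isPrefixOf])]
  have h2 : r2 ('y'::'e'::r1 t) = ' ' :: r2 (r1 t) := by
    unfold r2
    rw [replace_pos _ _ _ (by decide) (by simp [pvYE, List.isPrefixOf])]
    simp [pvYE, pvSP]
  rw [h2, r3_cons _ _ (by simp [pvWOO, List.isPrefixOf]),
      r4_cons _ _ (by simp [pvMA, List.isPrefixOf])]

theorem ceq_woo (t : List Char) : chain ('w'::'o'::'o'::t) = ' ' :: chain t := by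
  unfold chain
  rw [r1_cons _ _ (by simp [pvAYA, List.isPrefixOf]),
      r1_cons _ _ (by simp [pvAYA, List.isPrefixOf]),
      r1_cons _ _ (by simp [pvAYA, List.isPrefixOf]),
      r2_cons _ _ (by simp [pvYE, List.isPrefixOf]),
      r2_cons _ _ (by simp [pvYE, List.isPrefixOf]),
      r2_cons _ _ (by simp [pvYE, List.isPrefixOf])]
  have h3 : r3 ('w'::'o'::'o'::r2 (r1 t)) = ' ' :: r3 (r2 (r1 t)) := by
    unfold r3
    rw [replace_pos _ _ _ (by decide) (by simp [pvWOO, List.isPrefixOf])]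
    simp [pvWOO, pvSP]
  rw [h3, r4_cons _ _ (by simp [pvMA, List.isPrefixOf])]

theorem single_isPrefixOf (a : Char) (X : List Char) :
    [a].isPrefixOf X = (X.head? == some a) := by
  cases X with
  | nil => rfl
  | cons x xs => simp [List.isPrefixOf, BEq.comm]

theorem ceq_ma (t : List Char) (h : t.take 2 ≠ ['y', 'a']) :
    chain ('m'::'a'::t) = ' ' :: chain t := by
  unfold chain
  have hya : List.isPrefixOf ['y','a'] t = false := by
    rw [← Bool.not_eq_true, List.isPrefixOf_iff_prefix]
    intro hh
    exact h (List.prefix_iff_eq_take.mp hh).symm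
  rw [r1_cons _ _ (by simp [pvAYA, List.isPrefixOf]),
      r1_cons _ _ (by simp [pvAYA, List.isPrefixOf, hya]),
      r2_cons _ _ (by simp [pvYE, List.isPrefixOf]),
      r2_cons _ _ (by simp [pvYE, List.isPrefixOf]),
      r3_cons _ _ (by simp [pvWOO, List.isPrefixOf]),
      r3_cons _ _ (by simp [pvWOO, List.isPrefixOf])]
  have h4 : r4 ('m'::'a'::r3 (r2 (r1 t))) = ' ' :: r4 (r3 (r2 (r1 t))) := by
    unfold r4
    rw [replace_pos _ _ _ (by decide) (by simp [pvMA, List.isPrefixOf])]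
    simp [pvMA, pvSP]
  rw [h4]

theorem ceq_maya (t : List Char) : chain ('m'::'a'::'y'::'a'::t) = 'm' :: ' ' :: chain t := by
  unfold chain
  have h1 : r1 ('m'::'a'::'y'::'a'::t) = 'm' :: ' ' :: r1 t := by
    rw [r1_cons _ _ (by simp [pvAYA, List.isPrefixOf])]
    unfold r1
    rw [replace_pos _ _ _ (by decide) (by simp [pvAYA, List.isPrefixOf])]
    simp [pvAYA, pvSP]
  rw [h1,
      r2_cons _ _ (by simp [pvYE, List.isPrefixOf]),
      r2_cons _ _ (by simp [pvYE, List.isPrefixOf]),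
      r3_cons _ _ (by simp [pvWOO, List.isPrefixOf]),
      r3_cons _ _ (by simp [pvWOO, List.isPrefixOf]),
      r4_cons _ _ (by simp [pvMA, List.isPrefixOf]),
      r4_cons _ _ (by simp [pvMA, List.isPrefixOf])]

theorem ceq_other (c : Char) (t : List Char)
    (h1 : pvAYA.isPrefixOf (c :: t) = false)
    (h2 : c = 'y' → t.head? ≠ some 'e')
    (h3 : c = 'w' → t.take 2 ≠ ['o', 'o'])
    (h4 : c = 'm' → t.head? ≠ some 'a') :
    chain (c :: t) = c :: chain t := by
  unfold chain
  rw [r1_cons _ _ h1]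
  have hye : pvYE.isPrefixOf (c :: r1 t) = false := by
    by_cases hc : c = 'y'
    · subst hc
      simp only [pvYE, List.isPrefixOf, beq_self_eq_true, Bool.true_and, single_isPrefixOf]
      cases hX : (r1 t).head? with
      | none => simp
      | some d =>
        rcases head_r1 _ _ hX with h | h
        · subst h; simp
        · simp only [beq_eq_false_iff_ne, ne_eq, Option.some.injEq]
          intro hd; subst hd; exact h2 rfl h
    · simp [pvYE, List.isPrefixOf, hc, Ne.symm hc]
  rw [r2_cons _ _ hye]
  have hwoo : pvWOO.isPrefixOf (c :: r2 (r1 t)) = false := by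
    by_cases hc : c = 'w'
    · subst hc
      simp only [pvWOO, List.isPrefixOf, beq_self_eq_true, Bool.true_and]
      rw [← Bool.not_eq_true, List.isPrefixOf_iff_prefix]
      intro hpre
      obtain ⟨u, hu⟩ := hpre
      have hhead : (r2 (r1 t)).head? = some 'o' := by rw [← hu]; rfl
      rcases head_c2 _ _ hhead with h | h
      · exact absurd h (by decide)
      · cases t with
        | nil => simp at h
        | cons d t' =>
          simp at h; subst h
          rw [r1_cons _ _ (by simp [pvAYA, List.isPrefixOf]),
              r2_cons _ _ (by simp [pvYE, List.isPrefixOf])] at hu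
          have hr : r2 (r1 t') = 'o' :: u := by
            have := hu.symm
            simpa using this
          have hhead2 : (r2 (r1 t')).head? = some 'o' := by rw [hr]; rfl
          rcases head_c2 _ _ hhead2 with h' | h'
          · exact absurd h' (by decide)
          · apply h3 rfl
            cases t' with
            | nil => simp at h'
            | cons e u' => simp at h'; subst h'; rfl
    · simp [pvWOO, List.isPrefixOf, hc, Ne.symm hc]
  rw [r3_cons _ _ hwoo]
  have hma : pvMA.isPrefixOf (c :: r3 (r2 (r1 t))) = false := by
    by_cases hc : c = 'm'
    · subst hc
      simp only [pvMA, List.isPrefixOf, beq_self_eq_true, Bool.true_and, single_isPrefixOf]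
      cases hX : (r3 (r2 (r1 t))).head? with
      | none => simp
      | some d =>
        rcases head_c3 _ _ hX with h | h
        · subst h; simp
        · simp only [beq_eq_false_iff_ne, ne_eq, Option.some.injEq]
          intro hd; subst hd; exact h4 rfl h
    · simp [pvMA, List.isPrefixOf, hc, Ne.symm hc]
  rw [r4_cons _ _ hma]

theorem allSpace_chain : ∀ (n : Nat) (w : List Char), w.length ≤ n →
    (chain w).all (· == ' ') = spacedTokP w := by
  intro n
  induction n with
  | zero =>
    intro w hw
    have : w = [] := List.eq_nil_of_length_eq_zero (by omega)
    subst this; rw [ceq_nil]; rfl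
  | succ n ih =>
    intro w hw
    rw [spacedTokP.eq_def]
    split
    · rw [ceq_nil]; rfl
    · rename_i r; rw [ceq_aya]; simp only [List.all_cons, beq_self_eq_true, Bool.true_and]
      exact ih r (by simp at hw; omega)
    · rename_i r; rw [ceq_ye]; simp only [List.all_cons, beq_self_eq_true, Bool.true_and]
      exact ih r (by simp at hw; omega)
    · rename_i r; rw [ceq_woo]; simp only [List.all_cons, beq_self_eq_true, Bool.true_and]
      exact ih r (by simp at hw; omega)
    · rename_i r
      by_cases hya : r.take 2 = ['y', 'a']
      · obtain ⟨s, hs⟩ : ∃ s, r = 'y'::'a'::s := by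
          cases r with
          | nil => simp at hya
          | cons a b =>
            cases b with
            | nil => simp at hya
            | cons a' b' => simp at hya; exact ⟨b', by simp [hya.1, hya.2]⟩
        subst hs
        rw [ceq_maya]
        simp [spacedTokP]
      · rw [ceq_ma _ hya]; simp only [List.all_cons, beq_self_eq_true, Bool.true_and]
        exact ih r (by simp at hw; omega)
    · rename_i r
      rw [ceq_other _ _ (by simp [pvAYA, List.isPrefixOf]) (by simp) (by simp) (by simp)]
      simp only [List.all_cons, beq_self_eq_true, Bool.true_and]
      exact ih r (by simp at hw; omega)
    · rename_i x h_nil h_aya h_ye h_woo h_ma h_sp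
      cases w with
      | nil => exact absurd (h_nil rfl) id
      | cons c t =>
        have hc_sp : c ≠ ' ' := by intro hc; subst hc; exact h_sp t rfl
        have h1 : pvAYA.isPrefixOf (c :: t) = false := by
          rw [← Bool.not_eq_true, List.isPrefixOf_iff_prefix]
          intro hh
          obtain ⟨u, hu⟩ := hh
          exact h_aya u (by simpa [pvAYA] using hu.symm)
        rw [ceq_other c t h1 ?h2 ?h3 ?h4]
        · simp [List.all_cons, hc_sp]
        case h2 =>
          intro hc hhd; subst hc
          cases t with
          | nil => simp at hhd
          | cons d u => simp at hhd; subst hhd; exact h_ye u rfl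
        case h3 =>
          intro hc htk; subst hc
          cases t with
          | nil => simp at htk
          | cons d u =>
            cases u with
            | nil => simp at htk
            | cons d' u' =>
              simp at htk
              exact h_woo u' (by simp [htk.1, htk.2])
        case h4 =>
          intro hc hhd; subst hc
          cases t with
          | nil => simp at hhd
          | cons d u => simp at hhd; subst hhd; exact h_ma u rfl

theorem head_c4 (t : List Char) (c : Char) (h : (chain t).head? = some c) :
    c = ' ' ∨ t.head? = some c := by
  unfold chain r4 at h
  rcases head_replace _ _ (by decide) _ h with h' | h'
  · exact Or.inl h'
  · exact head_c3 _ _ h'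

theorem notInfix_sp (tok : List Char) (htok : tok ∈ [pvAYA, pvYE, pvWOO, pvMA]) (X : List Char) :
    ¬ tok <+: (' ' :: X) := by
  intro hpre
  obtain ⟨u, hu⟩ := hpre
  simp only [List.mem_cons, List.not_mem_nil, or_false] at htok
  rcases htok with h | h | h | h <;> subst h <;> simp_all [pvAYA, pvYE, pvWOO, pvMA]

theorem chain_shape (c : Char) (t : List Char) :
    (∃ r, chain (c :: t) = ' ' :: chain r ∧ r.length ≤ t.length) ∨
    (∃ s, chain (c :: t) = 'm' :: ' ' :: chain s ∧ s.length ≤ t.length) ∨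
    (chain (c :: t) = c :: chain t ∧ c ≠ ' ' ∧
       (c = 'a' → t.take 2 ≠ ['y', 'a']) ∧ (c = 'y' → t.head? ≠ some 'e') ∧
       (c = 'w' → t.take 2 ≠ ['o', 'o']) ∧ (c = 'm' → t.head? ≠ some 'a')) := by
  by_cases hsp : c = ' '
  · subst hsp
    exact Or.inl ⟨t, ceq_other _ _ (by simp [pvAYA, List.isPrefixOf]) (by simp) (by simp) (by simp),
      le_rfl⟩
  by_cases ha : c = 'a' ∧ t.take 2 = ['y', 'a']
  · obtain ⟨hc, hta⟩ := ha; subst hc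
    obtain ⟨r, hr⟩ : ∃ r, t = 'y' :: 'a' :: r := by
      rcases t with _ | ⟨d, _ | ⟨d', u⟩⟩ <;> simp at hta
      exact ⟨u, by simp [hta.1, hta.2]⟩
    subst hr
    exact Or.inl ⟨r, ceq_aya r, by simp; omega⟩
  by_cases hy : c = 'y' ∧ t.head? = some 'e'
  · obtain ⟨hc, hte⟩ := hy; subst hc
    obtain ⟨r, hr⟩ : ∃ r, t = 'e' :: r := by
      rcases t with _ | ⟨d, u⟩ <;> simp at hte
      exact ⟨u, by simp [hte]⟩
    subst hr
    exact Or.inl ⟨r, ceq_ye r, by simp⟩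
  by_cases hw : c = 'w' ∧ t.take 2 = ['o', 'o']
  · obtain ⟨hc, hto⟩ := hw; subst hc
    obtain ⟨r, hr⟩ : ∃ r, t = 'o' :: 'o' :: r := by
      rcases t with _ | ⟨d, _ | ⟨d', u⟩⟩ <;> simp at hto
      exact ⟨u, by simp [hto.1, hto.2]⟩
    subst hr
    exact Or.inl ⟨r, ceq_woo r, by simp; omega⟩
  by_cases hm : c = 'm' ∧ t.head? = some 'a'
  · obtain ⟨hc, hta⟩ := hm; subst hc
    obtain ⟨u, hu⟩ : ∃ u, t = 'a' :: u := by
      rcases t with _ | ⟨d, u⟩ <;> simp at hta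
      exact ⟨u, by simp [hta]⟩
    subst hu
    by_cases hya : u.take 2 = ['y', 'a']
    · obtain ⟨s', hs⟩ : ∃ s', u = 'y' :: 'a' :: s' := by
        rcases u with _ | ⟨d, _ | ⟨d', v⟩⟩ <;> simp at hya
        exact ⟨v, by simp [hya.1, hya.2]⟩
      subst hs
      exact Or.inr (Or.inl ⟨s', ceq_maya s', by simp; omega⟩)
    · exact Or.inl ⟨u, ceq_ma u hya, by simp⟩
  · refine Or.inr (Or.inr ⟨?_, hsp, ?_, ?_, ?_, ?_⟩)
    · refine ceq_other c t ?_ (fun hc hh => hy ⟨hc, hh⟩) (fun hc hh => hw ⟨hc, hh⟩)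
        (fun hc hh => hm ⟨hc, hh⟩)
      rw [← Bool.not_eq_true, List.isPrefixOf_iff_prefix]
      intro hpre
      obtain ⟨u, hu⟩ := hpre
      have : c = 'a' ∧ t = 'y' :: 'a' :: u := by simpa [pvAYA] using hu.symm
      exact ha ⟨this.1, by simp [this.2]⟩
    · exact fun hc hh => ha ⟨hc, hh⟩
    · exact fun hc hh => hy ⟨hc, hh⟩
    · exact fun hc hh => hw ⟨hc, hh⟩
    · exact fun hc hh => hm ⟨hc, hh⟩

theorem noTok_chain : ∀ (n : Nat) (w : List Char), w.length ≤ n →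
    ∀ tok ∈ [pvAYA, pvYE, pvWOO, pvMA], ¬ tok <:+: chain w := by
  intro n
  induction n with
  | zero =>
    intro w hw tok htok
    have : w = [] := List.eq_nil_of_length_eq_zero (by omega)
    subst this; rw [ceq_nil]
    intro hh
    simp only [List.mem_cons, List.not_mem_nil, or_false] at htok
    rcases htok with h | h | h | h <;> subst h <;> simp_all [pvAYA, pvYE, pvWOO, pvMA]
  | succ n ih =>
    intro w hw tok htok
    rcases w with _ | ⟨c, t⟩
    · rw [ceq_nil]; intro hh
      simp only [List.mem_cons, List.not_mem_nil, or_false] at htok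
      rcases htok with h | h | h | h <;> subst h <;> simp_all [pvAYA, pvYE, pvWOO, pvMA]
    · simp only [List.length_cons] at hw
      rcases chain_shape c t with ⟨r, hcr, hlr⟩ | ⟨s, hcs, hls⟩ | ⟨hct, hcsp, hA, hY, hW, hM⟩
      · rw [hcr]
        intro hinf
        rcases List.infix_cons_iff.mp hinf with hpre | htl
        · exact notInfix_sp tok htok _ hpre
        · exact ih r (by omega) tok htok htl
      · rw [hcs]
        intro hinf
        rcases List.infix_cons_iff.mp hinf with hpre | htl
        · obtain ⟨u, hu⟩ := hpre
          simp only [List.mem_cons, List.not_mem_nil, or_false] at htok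
          rcases htok with h | h | h | h <;> subst h <;> simp_all [pvAYA, pvYE, pvWOO, pvMA]
        · rcases List.infix_cons_iff.mp htl with hpre | htl'
          · exact notInfix_sp tok htok _ hpre
          · exact ih s (by omega) tok htok htl'
      · rw [hct]
        intro hinf
        rcases List.infix_cons_iff.mp hinf with hpre | htl
        · obtain ⟨u, hu⟩ := hpre
          simp only [List.mem_cons, List.not_mem_nil, or_false] at htok
          rcases htok with h | h | h | h
          · subst h
            have hca : c = 'a' ∧ chain t = 'y' :: 'a' :: u := by simpa [pvAYA] using hu.symm
            have hht : (chain t).head? = some 'y' := by rw [hca.2]; rfl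
            rcases head_c4 _ _ hht with hh | hh
            · exact absurd hh (by decide)
            · obtain ⟨t', ht'⟩ : ∃ t', t = 'y' :: t' := by
                rcases t with _ | ⟨d, v⟩ <;> simp at hh
                exact ⟨v, by simp [hh]⟩
              subst ht'
              by_cases he : t'.head? = some 'e'
              · obtain ⟨t'', ht''⟩ : ∃ t'', t' = 'e' :: t'' := by
                  rcases t' with _ | ⟨d, v⟩ <;> simp at he
                  exact ⟨v, by simp [he]⟩
                subst ht''
                rw [ceq_ye] at hca
                exact absurd hca.2 (by simp)
              · have hco : chain ('y' :: t') = 'y' :: chain t' :=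
                  ceq_other _ _ (by simp [pvAYA, List.isPrefixOf]) (fun _ => he) (by simp) (by simp)
                rw [hco] at hca
                have : chain t' = 'a' :: u := by simpa using hca.2
                have hht' : (chain t').head? = some 'a' := by rw [this]; rfl
                rcases head_c4 _ _ hht' with hh' | hh'
                · exact absurd hh' (by decide)
                · apply hA hca.1
                  rcases t' with _ | ⟨d, v⟩ <;> simp at hh'
                  simp [hh']
          · subst h
            have hca : c = 'y' ∧ chain t = 'e' :: u := by simpa [pvYE] using hu.symm
            have hht : (chain t).head? = some 'e' := by rw [hca.2]; rfl
            rcases head_c4 _ _ hht with hh | hh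
            · exact absurd hh (by decide)
            · exact hY hca.1 hh
          · subst h
            have hca : c = 'w' ∧ chain t = 'o' :: 'o' :: u := by simpa [pvWOO] using hu.symm
            have hht : (chain t).head? = some 'o' := by rw [hca.2]; rfl
            rcases head_c4 _ _ hht with hh | hh
            · exact absurd hh (by decide)
            · obtain ⟨t', ht'⟩ : ∃ t', t = 'o' :: t' := by
                rcases t with _ | ⟨d, v⟩ <;> simp at hh
                exact ⟨v, by simp [hh]⟩
              subst ht'
              have hco : chain ('o' :: t') = 'o' :: chain t' :=
                ceq_other _ _ (by simp [pvAYA, List.isPrefixOf]) (by simp) (by simp) (by simp)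
              rw [hco] at hca
              have : chain t' = 'o' :: u := by simpa using hca.2
              have hht' : (chain t').head? = some 'o' := by rw [this]; rfl
              rcases head_c4 _ _ hht' with hh' | hh'
              · exact absurd hh' (by decide)
              · apply hW hca.1
                rcases t' with _ | ⟨d, v⟩ <;> simp at hh'
                simp [hh']
          · subst h
            have hca : c = 'm' ∧ chain t = 'a' :: u := by simpa [pvMA] using hu.symm
            have hht : (chain t).head? = some 'a' := by rw [hca.2]; rfl
            rcases head_c4 _ _ hht with hh | hh
            · exact absurd hh (by decide)
            · exact hM hca.1 hh
        · exact ih t (by omega) tok htok htl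

theorem despace (w : List Char) : PySem.Chars.replace w pvSP [] = w.filter (fun c => !(c == ' ')) := by
  induction w with
  | nil => exact replace_nil _ _ (by decide)
  | cons c t ih =>
    by_cases hc : c = ' '
    · subst hc
      rw [replace_pos _ _ _ (by decide) (by simp [pvSP, List.isPrefixOf])]
      simpa [pvSP] using ih
    · rw [replace_cons_neg _ _ (by decide) _ _ (by simp [pvSP, List.isPrefixOf, Ne.symm hc]),
          List.filter_cons_of_pos (by simp [hc])]
      exact congrArg _ ih

def anyTok (w : List Char) : Bool :=
  PySem.Chars.isIn pvAYA w || PySem.Chars.isIn pvYE w ||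
  PySem.Chars.isIn pvWOO w || PySem.Chars.isIn pvMA w

theorem isIn_cons (tok : List Char) (c : Char) (r : List Char) :
    PySem.Chars.isIn tok (c :: r) = (tok.isPrefixOf (c :: r) || PySem.Chars.isIn tok r) := by
  rw [Bool.eq_iff_iff]
  simp only [Bool.or_eq_true, PySem.Chars.isIn_iff_infix, List.isPrefixOf_iff_prefix,
    List.infix_cons_iff]

theorem isIn_of_prefix (tok w : List Char) (h : tok <+: w) : PySem.Chars.isIn tok w = true := by
  rw [PySem.Chars.isIn_iff_infix]; exact h.isInfix

theorem anyTok_of_spacedTok : ∀ (n : Nat) (w : List Char), w.length ≤ n →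
    spacedTokP w = true → anyTok w = w.any (· != ' ') := by
  intro n
  induction n with
  | zero =>
    intro w hw _
    have : w = [] := List.eq_nil_of_length_eq_zero (by omega)
    subst this
    simp only [anyTok, List.any_nil]
    rw [← Bool.not_eq_true]
    simp [PySem.Chars.isIn_iff_infix, pvAYA, pvYE, pvWOO, pvMA]
  | succ n ih =>
    intro w hw h
    rw [spacedTokP.eq_def] at h
    split at h
    · simp only [anyTok, List.any_nil]
      rw [← Bool.not_eq_true]
      simp [PySem.Chars.isIn_iff_infix, pvAYA, pvYE, pvWOO, pvMA]
    · rename_i r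
      rw [Bool.eq_iff_iff]
      constructor
      · intro _; simp
      · intro _
        simp only [anyTok, Bool.or_eq_true]
        exact Or.inl (Or.inl (Or.inl (isIn_of_prefix pvAYA _ ⟨r, rfl⟩)))
    · rename_i r
      rw [Bool.eq_iff_iff]
      constructor
      · intro _; simp
      · intro _
        simp only [anyTok, Bool.or_eq_true]
        exact Or.inl (Or.inl (Or.inr (isIn_of_prefix pvYE _ ⟨r, rfl⟩)))
    · rename_i r
      rw [Bool.eq_iff_iff]
      constructor
      · intro _; simp
      · intro _
        simp only [anyTok, Bool.or_eq_true]
        exact Or.inl (Or.inr (isIn_of_prefix pvWOO _ ⟨r, rfl⟩))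
    · rename_i r
      rw [Bool.eq_iff_iff]
      constructor
      · intro _; simp
      · intro _
        simp only [anyTok, Bool.or_eq_true]
        exact Or.inr (isIn_of_prefix pvMA _ ⟨r, rfl⟩)
    · rename_i r
      have heq : anyTok (' ' :: r) = anyTok r := by
        simp only [anyTok, isIn_cons]
        simp [pvAYA, pvYE, pvWOO, pvMA, List.isPrefixOf]
      rw [heq, ih r (by simp at hw; omega) h]
      simp
    · simp at h

def indA (w : List Char) : Bool := anyTok w && (chain w).all (· == ' ')

theorem indA_eq (w : List Char) : indA w = (spacedTokP w && w.any (· != ' ')) := by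
  unfold indA
  by_cases hst : spacedTokP w = true
  · rw [allSpace_chain w.length w le_rfl, anyTok_of_spacedTok w.length w le_rfl hst,
       Bool.and_comm]
  · have hf : spacedTokP w = false := by revert hst; cases spacedTokP w <;> simp
    rw [allSpace_chain w.length w le_rfl, hf]
    simp

theorem altScan_no_space : ∀ (n : Nat) (w : List Char), w.length ≤ n →
    altScan w = true → ' ' ∉ w := by
  intro n
  induction n with
  | zero =>
    intro w hw _
    have : w = [] := List.eq_nil_of_length_eq_zero (by omega)
    subst this; simp
  | succ n ih =>
    intro w hw h
    rw [altScan.eq_def] at h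
    split at h
    · simp
    all_goals rename_i r
    · intro hm
      simp only [List.mem_cons] at hm
      rcases hm with h' | h' | h' | h''
      · exact absurd h' (by decide)
      · exact absurd h' (by decide)
      · exact absurd h' (by decide)
      · exact ih r (by simp at hw; omega) h h''
    · intro hm
      simp only [List.mem_cons] at hm
      rcases hm with h' | h' | h''
      · exact absurd h' (by decide)
      · exact absurd h' (by decide)
      · exact ih r (by simp at hw; omega) h h''
    · intro hm
      simp only [List.mem_cons] at hm
      rcases hm with h' | h' | h' | h''
      · exact absurd h' (by decide)
      · exact absurd h' (by decide)
      · exact absurd h' (by decide)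
      · exact ih r (by simp at hw; omega) h h''
    · intro hm
      simp only [List.mem_cons] at hm
      rcases hm with h' | h' | h''
      · exact absurd h' (by decide)
      · exact absurd h' (by decide)
      · exact ih r (by simp at hw; omega) h h''
    · simp at h

theorem altScan_eq_spacedTok : ∀ (n : Nat) (w : List Char), w.length ≤ n →
    ' ' ∉ w → altScan w = spacedTokP w := by
  intro n
  induction n with
  | zero =>
    intro w hw _
    have : w = [] := List.eq_nil_of_length_eq_zero (by omega)
    subst this; rfl
  | succ n ih =>
    intro w hw hsp
    rw [spacedTokP.eq_def]
    split
    · rfl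
    · rename_i r
      rw [show altScan ('a'::'y'::'a'::r) = altScan r from rfl]
      exact ih r (by simp at hw; omega) (fun hm => hsp (by simp [hm]))
    · rename_i r
      rw [show altScan ('y'::'e'::r) = altScan r from rfl]
      exact ih r (by simp at hw; omega) (fun hm => hsp (by simp [hm]))
    · rename_i r
      rw [show altScan ('w'::'o'::'o'::r) = altScan r from rfl]
      exact ih r (by simp at hw; omega) (fun hm => hsp (by simp [hm]))
    · rename_i r
      rw [show altScan ('m'::'a'::r) = altScan r from rfl]
      exact ih r (by simp at hw; omega) (fun hm => hsp (by simp [hm]))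
    · rename_i r
      exact absurd (by simp : ' ' ∈ ' ' :: r) hsp
    · rename_i w' h_nil h_aya h_ye h_woo h_ma h_sp
      rw [altScan.eq_def]
      split
      · exact absurd rfl h_nil
      · rename_i r
        exact absurd rfl (h_aya r)
      · rename_i r
        exact absurd rfl (h_ye r)
      · rename_i r
        exact absurd rfl (h_woo r)
      · rename_i r
        exact absurd rfl (h_ma r)
      · rfl

def chainS (s : String) : String :=
  PySem.Str.replace (PySem.Str.replace (PySem.Str.replace
    (PySem.Str.replace s "aya" " ") "ye" " ") "woo" " ") "ma" " "

theorem toList_chainS (s : String) : (chainS s).toList = chain s.toList := by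
  have h1 : "aya".toList = pvAYA := by decide
  have h2 : "ye".toList = pvYE := by decide
  have h3 : "woo".toList = pvWOO := by decide
  have h4 : "ma".toList = pvMA := by decide
  have h5 : " ".toList = pvSP := by decide
  simp [chainS, chain, r1, r2, r3, r4, PySem.Str.toList_replace, h1, h2, h3, h4, h5]

def anyTokS (s : String) : Bool :=
  PySem.Str.isIn "aya" s || PySem.Str.isIn "ye" s || PySem.Str.isIn "woo" s || PySem.Str.isIn "ma" s

theorem anyTokS_eq (s : String) : anyTokS s = anyTok s.toList := by
  have h1 : "aya".toList = pvAYA := by decide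
  have h2 : "ye".toList = pvYE := by decide
  have h3 : "woo".toList = pvWOO := by decide
  have h4 : "ma".toList = pvMA := by decide
  simp [anyTokS, anyTok, PySem.Str.isIn_eq, h1, h2, h3, h4]

theorem noTokS (can : String) (hcan : can ∈ (["aya", "ye", "woo", "ma"] : List String))
    (s : String) : PySem.Str.isIn can (chainS s) = false := by
  rw [PySem.Str.isIn_eq, toList_chainS, PySem.Chars.isIn_eq_false_iff]
  apply noTok_chain s.toList.length s.toList le_rfl
  simp only [List.mem_cons, List.not_mem_nil, or_false] at hcan
  rcases hcan with h | h | h | h <;> subst h <;> decide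

theorem perword (baby : String) (check : List String) :
    ((["aya", "ye", "woo", "ma"] : List String).foldl (fun (st : String × List String) can =>
        if PySem.Str.isIn can st.1 then
          let b' := (["aya", "ye", "woo", "ma"] : List String).foldl
            (fun b i => PySem.Str.replace b i " ") st.1
          (b', st.2 ++ [b'])
        else st) (baby, check)).2
    = if anyTokS baby then check ++ [chainS baby] else check := by
  simp only [List.foldl_cons, List.foldl_nil]
  by_cases h1 : PySem.Str.isIn "aya" baby = true
  · simp only [h1, if_true]
    simp only [show ∀ s, PySem.Str.replace (PySem.Str.replace (PySem.Str.replace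
      (PySem.Str.replace s "aya" " ") "ye" " ") "woo" " ") "ma" " " = chainS s from fun _ => rfl]
    simp only [noTokS "ye" (by simp), noTokS "woo" (by simp), noTokS "ma" (by simp),
      Bool.false_eq_true, if_false]
    have hC1 : PySem.Chars.isIn ['a','y','a'] baby.toList = true := by simpa using h1
    simp [anyTokS, hC1]
  · simp only [Bool.not_eq_true] at h1
    simp only [h1, Bool.false_eq_true, if_false]
    by_cases h2 : PySem.Str.isIn "ye" baby = true
    · simp only [h2, if_true]
      simp only [show ∀ s, PySem.Str.replace (PySem.Str.replace (PySem.Str.replace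
        (PySem.Str.replace s "aya" " ") "ye" " ") "woo" " ") "ma" " " = chainS s from fun _ => rfl]
      simp only [noTokS "woo" (by simp), noTokS "ma" (by simp), Bool.false_eq_true, if_false]
      have hC2 : PySem.Chars.isIn ['y','e'] baby.toList = true := by simpa using h2
      simp [anyTokS, hC2]
    · simp only [Bool.not_eq_true] at h2
      simp only [h2, Bool.false_eq_true, if_false]
      by_cases h3 : PySem.Str.isIn "woo" baby = true
      · simp only [h3, if_true]
        simp only [show ∀ s, PySem.Str.replace (PySem.Str.replace (PySem.Str.replace
          (PySem.Str.replace s "aya" " ") "ye" " ") "woo" " ") "ma" " " = chainS s from fun _ => rfl]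
        simp only [noTokS "ma" (by simp), Bool.false_eq_true, if_false]
        have hC3 : PySem.Chars.isIn ['w','o','o'] baby.toList = true := by simpa using h3
        simp [anyTokS, hC3]
      · simp only [Bool.not_eq_true] at h3
        simp only [h3, Bool.false_eq_true, if_false]
        by_cases h4 : PySem.Str.isIn "ma" baby = true
        · simp only [h4, if_true]
          simp only [show ∀ s, PySem.Str.replace (PySem.Str.replace (PySem.Str.replace
            (PySem.Str.replace s "aya" " ") "ye" " ") "woo" " ") "ma" " " = chainS s from
            fun _ => rfl]
          have hC4 : PySem.Chars.isIn ['m','a'] baby.toList = true := by simpa using h4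
          simp [anyTokS, hC4]
        · simp only [Bool.not_eq_true] at h4
          simp only [h4, Bool.false_eq_true, if_false]
          have hC1 : PySem.Chars.isIn ['a','y','a'] baby.toList = false := by simpa using h1
          have hC2 : PySem.Chars.isIn ['y','e'] baby.toList = false := by simpa using h2
          have hC3 : PySem.Chars.isIn ['w','o','o'] baby.toList = false := by simpa using h3
          have hC4 : PySem.Chars.isIn ['m','a'] baby.toList = false := by simpa using h4
          simp [anyTokS, hC1, hC2, hC3, hC4]

theorem outerfold (l : List String) (acc : List String) :
    l.foldl (fun check baby =>
      ((["aya", "ye", "woo", "ma"] : List String).foldl (fun (st : String × List String) can =>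
        if PySem.Str.isIn can st.1 then
          let b' := (["aya", "ye", "woo", "ma"] : List String).foldl
            (fun b i => PySem.Str.replace b i " ") st.1
          (b', st.2 ++ [b'])
        else st) (baby, check)).2) acc
    = acc ++ (l.filter anyTokS).map chainS := by
  induction l generalizing acc with
  | nil => simp
  | cons x xs ih =>
    rw [List.foldl_cons, perword]
    by_cases hx : anyTokS x = true
    · rw [if_pos hx, ih, List.filter_cons_of_pos hx]
      simp
    · rw [if_neg hx, ih, List.filter_cons_of_neg hx]

theorem strEmpty (s : String) : (s == "") = s.toList.isEmpty := by
  rw [Bool.eq_iff_iff]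
  simp [List.isEmpty_iff, String.toList_eq_nil_iff]

theorem pointwiseA (s : String) :
    ((PySem.Str.replace (chainS s) " " "" == "") && anyTokS s) = indA s.toList := by
  rw [strEmpty]
  have h5 : " ".toList = pvSP := by decide
  have h6 : "".toList = ([] : List Char) := by decide
  rw [PySem.Str.toList_replace, h5, h6, toList_chainS, despace]
  have hfe : ((chain s.toList).filter (fun c => !(c == ' '))).isEmpty
      = (chain s.toList).all (· == ' ') := by
    rw [Bool.eq_iff_iff]
    simp [List.isEmpty_iff, List.filter_eq_nil_iff]
  rw [hfe, anyTokS_eq, Bool.and_comm]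
  rfl

theorem countP_congr_mem {α : Type} (l : List α) (p q : α → Bool) (h : ∀ a ∈ l, p a = q a) :
    l.countP p = l.countP q := by
  induction l with
  | nil => rfl
  | cons x xs ih =>
    rw [List.countP_cons, List.countP_cons, h x (by simp), ih (fun a ha => h a (by simp [ha]))]

theorem solution_eq_countP (l : List String) :
    solution l = ((l.countP (fun s => indA s.toList) : Nat) : Int) := by
  unfold solution
  dsimp only
  rw [outerfold, List.nil_append, PySem.List.foldl_count_if (fun i => i == "")]
  rw [List.countP_map, List.countP_map]
  rw [List.countP_filter]
  rw [countP_congr_mem _ _ _ (fun a _ => by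
    show ((PySem.Str.replace (chainS a) " " "" == "") && anyTokS a) = indA a.toList
    exact pointwiseA a)]
  simp

theorem solution_alt_eq_countP (l : List String) :
    solution_alt l = ((l.countP (fun s => altScan s.toList && !s.toList.isEmpty) : Nat) : Int) := by
  have h1 : solution_alt l = ((l.countP
      (fun w => bLoop w.toList (w.toList.length + 1) 0 && !w.toList.isEmpty) : Nat) : Int) := by
    unfold solution_alt
    have := PySem.List.foldl_count_if
      (fun w : String => bLoop w.toList (w.toList.length + 1) 0 && !w.toList.isEmpty) l 0
    simpa using this
  rw [h1, countP_congr_mem l _ _ (fun a _ => alt_ind a)]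

theorem indicator_eq (s : String)
    (h : ¬ (' ' ∈ s.toList ∧ s.toList.any (· != ' ') = true ∧ spc s.length s.toList = true)) :
    indA s.toList = (altScan s.toList && !s.toList.isEmpty) := by
  have hlen : s.toList.length ≤ s.length := by simp
  rw [spc_eq s.length s.toList hlen] at h
  rw [indA_eq]
  by_cases hsp : ' ' ∈ s.toList
  · have hA : altScan s.toList = false := by
      cases ha : altScan s.toList
      · rfl
      · exact absurd hsp (altScan_no_space s.toList.length s.toList le_rfl ha)
    rw [hA, Bool.false_and]
    cases hst : spacedTokP s.toList
    · simp
    · cases hany : s.toList.any (· != ' ')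
      · simp
      · exact absurd ⟨hsp, hany, hst⟩ h
  · rw [← altScan_eq_spacedTok s.toList.length s.toList le_rfl hsp]
    congr 1
    cases hw : s.toList with
    | nil => simp
    | cons c t =>
      have hc : c ≠ ' ' := fun hh => hsp (by simp [hw, hh])
      simp [hc]

theorem indB_imp_indA (s : String) (h : (altScan s.toList && !s.toList.isEmpty) = true) :
    indA s.toList = true := by
  rw [indA_eq]
  simp only [Bool.and_eq_true] at h
  obtain ⟨h1, h2⟩ := h
  have hsp := altScan_no_space s.toList.length s.toList le_rfl h1
  rw [← altScan_eq_spacedTok s.toList.length s.toList le_rfl hsp, h1, Bool.true_and]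
  cases hw : s.toList with
  | nil => rw [hw] at h2; simp at h2
  | cons c t =>
    have hc : c ≠ ' ' := fun hh => hsp (by simp [hw, hh])
    simp [hc]

theorem countP_strict {α : Type} (l : List α) (p q : α → Bool)
    (hpq : ∀ x ∈ l, p x = true → q x = true)
    (w : α) (hw : w ∈ l) (hp : p w = false) (hq : q w = true) :
    l.countP p < l.countP q := by
  induction l with
  | nil => simp at hw
  | cons x xs ih =>
    rw [List.countP_cons, List.countP_cons]
    have hx : (if p x = true then 1 else 0) ≤ (if q x = true then 1 else 0) := by
      by_cases hpx : p x = true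
      · simp [hpx, hpq x (by simp) hpx]
      · simp [hpx]
    rcases List.mem_cons.mp hw with he | hm
    · subst he
      have hmono : List.countP p xs ≤ List.countP q xs :=
        List.countP_mono_left (fun a ha hpa => hpq a (List.mem_cons_of_mem _ ha) hpa)
      rw [hp, hq]
      simp only [Bool.false_eq_true, if_false, if_true]
      omega
    · have := ih (fun a ha hpa => hpq a (List.mem_cons_of_mem _ ha) hpa) hm
      omega

-- ===== VERDICT (by name: the statement is the Claim_ definition above) =====
theorem solution_spec : Claim_unchanged_solution := by
  intro babbling _ hD
  rw [solution_eq_countP, solution_alt_eq_countP]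
  congr 1
  apply countP_congr_mem
  intro w hw
  apply indicator_eq
  intro hbad
  exact hD ⟨w, hw, hbad⟩

theorem solution_changed : Claim_changed_solution := by
  unfold Claim_changed_solution; decide

theorem solution_tight : Claim_exact_solution := by
  intro babbling _ hD
  obtain ⟨w, hw, hsp, hne, hspc⟩ := hD
  have hlen : w.toList.length ≤ w.length := by simp
  have hst : spacedTokP w.toList = true := by rw [← spc_eq w.length w.toList hlen]; exact hspc
  rw [solution_eq_countP, solution_alt_eq_countP]
  have hlt : babbling.countP (fun s => altScan s.toList && !s.toList.isEmpty)
      < babbling.countP (fun s => indA s.toList) := by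
    apply countP_strict _ _ _ (fun x _ hx => indB_imp_indA x hx) w hw
    · have hA : altScan w.toList = false := by
        cases ha : altScan w.toList
        · rfl
        · exact absurd hsp (altScan_no_space w.toList.length w.toList le_rfl ha)
      simp [hA]
    · rw [indA_eq, hst, Bool.true_and]
      exact hne
  intro hcontra
  omega
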